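-- pv_equiv track=rewrite | github.com/Unidata/awips2 | edexOsgi/com.raytheon.uf.edex.activetable/utility/common_static/base/vtec/VTECTableUtil.py | hazardCompare
-- ===== SOURCE A (Python) =====
-- def hazardCompare(rec1, rec2, fields):
--     for f in fields:
--         inRec1 = f in rec1
--         inRec2 = f in rec2
--         if inRec1 and inRec2:
--             if rec1[f] != rec2[f]:
--                 return 0
--         elif inRec1 or inRec2:
--             return 0  # one record has the field, set it not equal
--         else:
--             continue  # neither record has this field, that is ok
--     return 1
-- ===== SOURCE B (Python) =====
-- def hazardCompare(rec1, rec2, fields):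
--     p1 = {f for f in fields if f in rec1}
--     p2 = {f for f in fields if f in rec2}
--     if p1 != p2:
--         return 0  # some field is present in exactly one record
--     return int(all(rec1[f] == rec2[f] for f in p1))
-- ===== Notes on version B (the rewrite author's own statement) =====
-- stated objective: alternative
-- what changed: Replaces A's single fused presence+value loop with two separately-shaped passes: a presence-set comparison over the fields, then a value-comparison pass over the common present fields.
import Mathlib
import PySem

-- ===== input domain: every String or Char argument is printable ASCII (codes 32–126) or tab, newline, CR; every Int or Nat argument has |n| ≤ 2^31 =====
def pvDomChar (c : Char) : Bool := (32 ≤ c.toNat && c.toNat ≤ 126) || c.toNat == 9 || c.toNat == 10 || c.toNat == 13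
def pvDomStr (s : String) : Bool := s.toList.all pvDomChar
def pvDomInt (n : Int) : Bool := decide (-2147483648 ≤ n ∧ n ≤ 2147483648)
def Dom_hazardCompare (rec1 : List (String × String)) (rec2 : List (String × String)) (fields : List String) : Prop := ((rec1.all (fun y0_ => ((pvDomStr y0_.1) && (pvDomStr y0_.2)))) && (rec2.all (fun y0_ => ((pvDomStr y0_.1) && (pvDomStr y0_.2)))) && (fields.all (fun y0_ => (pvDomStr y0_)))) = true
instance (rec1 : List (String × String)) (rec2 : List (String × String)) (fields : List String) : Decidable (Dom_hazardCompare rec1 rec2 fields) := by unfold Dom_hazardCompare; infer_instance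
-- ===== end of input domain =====

-- B replaces A's single fused presence+value loop by a presence-set comparison followed by a
-- value pass over the common present fields (different decomposition; same asymptotic cost).


-- dict lookup (first match, as for a Python dict rendered as an association list)
def pvLook (rec : List (String × String)) (f : String) : Option String := List.lookup f rec

-- ===== PORT A =====
-- A: one loop over fields, fused presence test and value comparison, early return 0.
def hazardCompare (rec1 : List (String × String)) (rec2 : List (String × String)) (fields : List String) : Int :=
  match fields with
  | [] => 1
  | f :: rest =>
    let inRec1 := (pvLook rec1 f).isSome
    let inRec2 := (pvLook rec2 f).isSome
    if inRec1 && inRec2 then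
      if pvLook rec1 f ≠ pvLook rec2 f then 0
      else hazardCompare rec1 rec2 rest
    else if inRec1 || inRec2 then 0
    else hazardCompare rec1 rec2 rest

-- ===== PORT B =====
-- B: presence sets p1, p2; if they differ return 0, else compare values on the common set.
def hazardCompare_alt (rec1 : List (String × String)) (rec2 : List (String × String)) (fields : List String) : Int :=
  let p1 := PySem.Set.ofList (fields.filter (fun f => (pvLook rec1 f).isSome))
  let p2 := PySem.Set.ofList (fields.filter (fun f => (pvLook rec2 f).isSome))
  if ¬ (PySem.Set.equal p1 p2 = true) then 0
  else if p1.all (fun f => pvLook rec1 f == pvLook rec2 f) then 1 else 0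

-- ===== PRECONDITION & SPEC =====
def Spec_hazardCompare (rec1 : List (String × String)) (rec2 : List (String × String)) (fields : List String) (out : Int) : Prop := out = hazardCompare_alt rec1 rec2 fields
instance (rec1 : List (String × String)) (rec2 : List (String × String)) (fields : List String) (out : Int) : Decidable (Spec_hazardCompare rec1 rec2 fields out) := by unfold Spec_hazardCompare; infer_instance

-- ===== CLAIM (what is proved, stated in full; the proofs are below) =====
def Claim_equal_hazardCompare : Prop := ∀ (rec1 : List (String × String)) (rec2 : List (String × String)) (fields : List String), Dom_hazardCompare rec1 rec2 fields → Spec_hazardCompare rec1 rec2 fields (hazardCompare rec1 rec2 fields)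

-- ===== LEMMAS AND PROOFS =====

-- A returns 1 exactly when the two lookups agree (as options) on every listed field.
theorem hazardCompare_characterization (rec1 rec2 : List (String × String)) (fields : List String) :
    hazardCompare rec1 rec2 fields =
      if ∀ f ∈ fields, pvLook rec1 f = pvLook rec2 f then 1 else 0 := by
  induction fields with
  | nil => simp [hazardCompare]
  | cons f rest ih =>
    simp only [hazardCompare, ih, List.forall_mem_cons]
    cases hx1 : pvLook rec1 f <;> cases hx2 : pvLook rec2 f
    · simp
    · simp
    · simp
    · rename_i v w
      by_cases hvw : v = w
      · simp [hvw]
      · simp [hvw]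

-- B returns 1 under exactly the same condition.
theorem hazardCompare_alt_characterization (rec1 rec2 : List (String × String)) (fields : List String) :
    hazardCompare_alt rec1 rec2 fields =
      if ∀ f ∈ fields, pvLook rec1 f = pvLook rec2 f then 1 else 0 := by
  simp only [hazardCompare_alt]
  by_cases heq0 : PySem.Set.equal (PySem.Set.ofList (fields.filter (fun f => (pvLook rec1 f).isSome)))
      (PySem.Set.ofList (fields.filter (fun f => (pvLook rec2 f).isSome))) = true
  · -- presence agrees on every listed field
    have heq := (PySem.Set.equal_iff _ _).mp heq0
    have hpres : ∀ f ∈ fields, (pvLook rec1 f).isSome = (pvLook rec2 f).isSome := by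
      intro f hf
      have hmem := heq f
      simp only [PySem.Set.mem_ofList, List.mem_filter] at hmem
      by_cases h1 : (pvLook rec1 f).isSome <;> by_cases h2 : (pvLook rec2 f).isSome
      · simp [h1, h2]
      · exact absurd (hmem.mp ⟨hf, h1⟩).2 (by simpa using h2)
      · exact absurd (hmem.mpr ⟨hf, h2⟩).2 (by simpa using h1)
      · simp only [Bool.not_eq_true] at h1 h2; rw [h1, h2]
    rw [if_neg (by simpa using heq0)]
    by_cases hall : ∀ f ∈ fields, pvLook rec1 f = pvLook rec2 f
    · rw [if_pos, if_pos hall]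
      rw [List.all_eq_true]
      intro f hf
      simp only [PySem.Set.mem_ofList, List.mem_filter] at hf
      exact beq_iff_eq.mpr (hall f hf.1)
    · rw [if_neg, if_neg hall]
      push Not at hall
      obtain ⟨f, hf, hne⟩ := hall
      intro hA
      rw [List.all_eq_true] at hA
      have h1 : (pvLook rec1 f).isSome = true := by
        by_contra h1
        have h2 := hpres f hf
        simp only [Bool.not_eq_true] at h1
        rw [h1] at h2
        apply hne
        have h2s := h2.symm
        simp only [Option.isSome_eq_false_iff, Option.isNone_iff_eq_none] at h1 h2s
        rw [h1, h2s]
      have hfmem : f ∈ PySem.Set.ofList (fields.filter (fun f => (pvLook rec1 f).isSome)) := by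
        simp only [PySem.Set.mem_ofList, List.mem_filter]
        exact ⟨hf, h1⟩
      exact hne (beq_iff_eq.mp (hA f hfmem))
  · -- presence differs somewhere: both sides 0
    rw [if_pos heq0, if_neg]
    intro hall
    apply heq0
    rw [PySem.Set.equal_iff]
    intro f
    simp only [PySem.Set.mem_ofList, List.mem_filter]
    constructor
    · rintro ⟨hf, h1⟩; exact ⟨hf, by rw [← hall f hf]; exact h1⟩
    · rintro ⟨hf, h2⟩; exact ⟨hf, by rw [hall f hf]; exact h2⟩

-- ===== VERDICT (by name: the statement is the Claim_ definition above) =====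
theorem hazardCompare_spec : Claim_equal_hazardCompare := by
  intro rec1 rec2 fields _
  unfold Spec_hazardCompare
  rw [hazardCompare_characterization, hazardCompare_alt_characterization]
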